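-- pv_equiv track=rewrite | github.com/MaxNickell/Short-GPT | dataset/parallel_optimized.py | check_connectivity_batch
-- ===== SOURCE A (Python) =====
-- def check_connectivity_batch(args):
--     """
--     Worker function to check connectivity for a batch of edge combinations.
--     args: (n, nodes, edge_combinations_batch)
--     Returns a list of connected graphs (as edge lists).
--     Uses BFS for faster connectivity check (approx 3.4x faster than NetworkX).
--     """
--     n, nodes, edge_combinations = args
--     connected_graphs_edges = []
--
--     # Pre-allocate visited array and queue to avoid repeated allocation if possible,
--     # but inside the loop is cleaner for parallel safety.
--
--     for edges in edge_combinations: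
--         # Fast path for small N
--         if n <= 1:
--             connected_graphs_edges.append(edges)
--             continue
--
--         # Build adjacency list
--         # Using a fixed size list of lists is faster than dict
--         adj = [[] for _ in range(n)]
--         for u, v in edges:
--             adj[u].append(v)
--             adj[v].append(u)
--
--         # BFS
--         visited_count = 0
--         # We can use a simple list as stack for DFS or queue for BFS.
--         # DFS might be slightly faster due to list.pop() being O(1) vs deque.popleft()
--         # Let's use DFS with a list stack.
--         stack = [0]
--         visited = [False] * n
--         visited[0] = True
--         visited_count = 1
--
--         while stack:
--             u = stack.pop()
--             for v in adj[u]: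
--                 if not visited[v]:
--                     visited[v] = True
--                     visited_count += 1
--                     stack.append(v)
--
--         if visited_count == n:
--             connected_graphs_edges.append(edges)
--
--     return connected_graphs_edges
-- ===== SOURCE B (Python) =====
-- def check_connectivity_batch(args):
--     """
--     Same job as A, but per combination the connectivity test is a frontier-free
--     closure iteration over the edge list (no adjacency list, no DFS stack):
--     a boolean reachability array is saturated by repeated sweeps over the edges
--     until a sweep changes nothing; the graph is connected iff every node is reached.
--     """
--     n, nodes, edge_combinations = args
--     connected_graphs_edges = []
--     for edges in edge_combinations:
--         if n <= 1:
--             connected_graphs_edges.append(edges)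
--             continue
--         reach = [False] * n
--         reach[0] = True
--         changed = True
--         while changed:
--             changed = False
--             for u, v in edges:
--                 if reach[u] != reach[v]:
--                     reach[u] = True
--                     reach[v] = True
--                     changed = True
--         if all(reach):
--             connected_graphs_edges.append(edges)
--     return connected_graphs_edges
-- ===== Notes on version B (the rewrite author's own statement) =====
-- stated objective: alternative
-- what changed: Replaces the per-combination adjacency-list construction plus explicit-stack DFS with a frontier-free closure iteration: a boolean reachability array is saturated by repeated in-place sweeps over the raw edge list until a sweep changes nothing, and the graph is connected iff every node is reached.
import Mathlib
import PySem

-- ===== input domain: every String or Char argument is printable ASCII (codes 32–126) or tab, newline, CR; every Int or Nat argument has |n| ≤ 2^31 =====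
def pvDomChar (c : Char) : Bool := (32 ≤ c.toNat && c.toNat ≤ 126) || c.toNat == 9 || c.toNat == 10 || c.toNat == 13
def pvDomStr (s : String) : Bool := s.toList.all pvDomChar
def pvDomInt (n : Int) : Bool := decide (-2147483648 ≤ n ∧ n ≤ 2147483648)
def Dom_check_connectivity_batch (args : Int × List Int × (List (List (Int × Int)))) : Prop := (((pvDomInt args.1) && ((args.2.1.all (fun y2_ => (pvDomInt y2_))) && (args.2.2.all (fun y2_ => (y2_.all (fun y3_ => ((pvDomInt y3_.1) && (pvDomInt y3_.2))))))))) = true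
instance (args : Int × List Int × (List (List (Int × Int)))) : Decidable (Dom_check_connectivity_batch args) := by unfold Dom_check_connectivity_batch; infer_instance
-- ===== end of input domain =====

-- B replaces A's adjacency-list + DFS-stack connectivity test by a frontier-free closure
-- iteration (sweep the edge list, saturating a reachability array, until a sweep changes
-- nothing); objective: alternative algorithm, same results.

-- ===== PORT A =====
-- adj[u].append(v)  (Python index semantics, possibly negative index; out-of-range is
-- IndexError in Python — excluded by Pre_ — and leaves the list unchanged here)
def pvAppendAt (adj : List (List Int)) (i x : Int) : List (List Int) :=
  PySem.List.pySetD adj i (PySem.List.pyGetD adj i [] ++ [x])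

-- 'for u, v in edges: adj[u].append(v); adj[v].append(u)'
def pvBuildAdj (edges : List (Int × Int)) (adj : List (List Int)) : List (List Int) :=
  edges.foldl (fun a p => pvAppendAt (pvAppendAt a p.1 p.2) p.2 p.1) adj

-- body of 'for v in adj[u]: if not visited[v]: …'; state = (visited, visited_count, stack)
def pvVisit (st : List Bool × Int × List Int) (v : Int) : List Bool × Int × List Int :=
  if PySem.List.pyGetD st.1 v false then st
  else (PySem.List.pySetD st.1 v true, st.2.1 + 1, v :: st.2.2)

-- 'while stack: u = stack.pop(); …'  (stack head = Python list end = top; fuel n suffices: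
-- every iteration pops one entry and entries are pushed only when a node is first visited)
def pvDfs (adj : List (List Int)) : Nat → List Int → List Bool → Int → List Bool × Int
  | 0, _, visited, cnt => (visited, cnt)
  | _ + 1, [], visited, cnt => (visited, cnt)
  | fuel + 1, u :: stack, visited, cnt =>
    let st := (PySem.List.pyGetD adj u []).foldl pvVisit (visited, cnt, stack)
    pvDfs adj fuel st.2.2 st.1 st.2.1

def check_connectivity_batch (args : Int × List Int × (List (List (Int × Int)))) : List (List (Int × Int)) :=
  args.2.2.foldl (fun acc edges =>
    if args.1 ≤ 1 then acc ++ [edges]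
    else
      let adj := pvBuildAdj edges (List.replicate args.1.toNat [])
      let visited := PySem.List.pySetD (List.replicate args.1.toNat false) 0 true
      let r := pvDfs adj args.1.toNat [0] visited 1
      if r.2 = args.1 then acc ++ [edges] else acc) []

-- ===== PORT B =====
-- body of 'for u, v in edges: if reach[u] != reach[v]: …'; state = (reach, changed)
def pvRelax (st : List Bool × Bool) (p : Int × Int) : List Bool × Bool :=
  if PySem.List.pyGetD st.1 p.1 false ≠ PySem.List.pyGetD st.1 p.2 false then
    (PySem.List.pySetD (PySem.List.pySetD st.1 p.1 true) p.2 true, true)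
  else st

-- one sweep of the edge list ('changed = False; for u, v in edges: …')
def pvSweep (edges : List (Int × Int)) (reach : List Bool) : List Bool × Bool :=
  edges.foldl pvRelax (reach, false)

-- 'while changed: …'  (fuel n suffices: every sweep that reports a change has strictly
-- enlarged the reach array, which holds at most n trues)
def pvSaturate (edges : List (Int × Int)) : Nat → List Bool → List Bool
  | 0, reach => reach
  | fuel + 1, reach =>
    let st := pvSweep edges reach
    if st.2 then pvSaturate edges fuel st.1 else st.1

def check_connectivity_batch_alt (args : Int × List Int × (List (List (Int × Int)))) : List (List (Int × Int)) :=
  args.2.2.foldl (fun acc edges =>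
    if args.1 ≤ 1 then acc ++ [edges]
    else
      let reach := pvSaturate edges args.1.toNat (PySem.List.pySetD (List.replicate args.1.toNat false) 0 true)
      if reach.all (fun b => b) then acc ++ [edges] else acc) []

-- ===== PRECONDITION & SPEC =====
-- Pre_ excludes exactly the inputs on which A raises IndexError: when n ≥ 2, every edge
-- endpoint must be a valid Python index into a length-n list, i.e. lie in [-n, n)
-- (negative endpoints use Python's index wraparound, identically in A and B).
def Pre_check_connectivity_batch (args : Int × List Int × (List (List (Int × Int)))) : Prop :=
  1 < args.1 → ∀ es ∈ args.2.2, ∀ p ∈ es,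
    (-args.1 ≤ p.1 ∧ p.1 < args.1) ∧ (-args.1 ≤ p.2 ∧ p.2 < args.1)
instance (args : Int × List Int × (List (List (Int × Int)))) : Decidable (Pre_check_connectivity_batch args) := by
  unfold Pre_check_connectivity_batch; infer_instance
def pvWitness_check_connectivity_batch : (Int × List Int × (List (List (Int × Int)))) :=
  (3, [0, 1, 2], [[(0, 1), (1, 2)], [(0, 1)], []])

def Spec_check_connectivity_batch (args : Int × List Int × (List (List (Int × Int)))) (out : List (List (Int × Int))) : Prop := out = check_connectivity_batch_alt args
instance (args : Int × List Int × (List (List (Int × Int)))) (out : List (List (Int × Int))) : Decidable (Spec_check_connectivity_batch args out) := by unfold Spec_check_connectivity_batch; infer_instance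

-- ===== CLAIM (what is proved, stated in full; the proofs are below) =====
def Claim_equal_check_connectivity_batch : Prop := ∀ (args : Int × List Int × (List (List (Int × Int)))), Dom_check_connectivity_batch args → Pre_check_connectivity_batch args → Spec_check_connectivity_batch args (check_connectivity_batch args)

-- ===== LEMMAS AND PROOFS =====

-- The normalized (Python) index of x into a length-n list; matches PySem.List.pyIdx?.
def pvNrm (n : Nat) (x : Int) : Nat := if 0 ≤ x then x.toNat else n - (-x).toNat

-- x is a valid Python index for length n
def pvInR (n : Nat) (x : Int) : Prop := -(n : Int) ≤ x ∧ x < (n : Int)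

-- the Boolean array read both programs use, on already-normalized indices
def pvBget (r : List Bool) (i : Nat) : Bool := r[i]?.getD false

-- the (symmetric) one-edge step relation of the graph, on normalized node indices
def pvStep (n : Nat) (es : List (Int × Int)) (a b : Nat) : Prop :=
  ∃ p ∈ es, (pvNrm n p.1 = a ∧ pvNrm n p.2 = b) ∨ (pvNrm n p.2 = a ∧ pvNrm n p.1 = b)

def pvClosed (n : Nat) (es : List (Int × Int)) (T : Nat → Prop) : Prop :=
  ∀ a b, pvStep n es a b → T a → T b

def pvValid (n : Nat) (es : List (Int × Int)) : Prop :=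
  ∀ p ∈ es, pvInR n p.1 ∧ pvInR n p.2

lemma pvNrm_lt {n : Nat} {x : Int} (h : pvInR n x) : pvNrm n x < n := by
  obtain ⟨h1, h2⟩ := h; unfold pvNrm; split_ifs with h0 <;> omega

lemma pyGetD_pvNrm {α : Type} (r : List α) (x : Int) (d : α) (h : pvInR r.length x) :
    PySem.List.pyGetD r x d = (r[pvNrm r.length x]?).getD d := by
  obtain ⟨h1, h2⟩ := h
  simp only [PySem.List.pyGetD, PySem.List.pyGet?, PySem.List.pyIdx?, pvNrm]
  split_ifs with h0 <;> simp [Option.bind]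

lemma pySetD_pvNrm {α : Type} (r : List α) (x : Int) (v : α) (h : pvInR r.length x) :
    PySem.List.pySetD r x v = r.set (pvNrm r.length x) v := by
  obtain ⟨h1, h2⟩ := h
  simp only [PySem.List.pySetD, PySem.List.pySet?, PySem.List.pyIdx?, pvNrm]
  split_ifs with h0 <;> simp

lemma pvBget_lt {r : List Bool} {i : Nat} (h : pvBget r i = true) : i < r.length := by
  by_contra hc
  unfold pvBget at h
  rw [List.getElem?_eq_none (by omega)] at h
  simp at h

lemma pvBget_set_self {r : List Bool} {i : Nat} (h : i < r.length) :
    pvBget (r.set i true) i = true := by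
  unfold pvBget; rw [List.getElem?_set_self h]; rfl

lemma pvBget_set_ne {r : List Bool} {i j : Nat} (v : Bool) (h : i ≠ j) :
    pvBget (r.set i v) j = pvBget r j := by
  unfold pvBget; rw [List.getElem?_set_ne h]

lemma pvBget_set_mono {r : List Bool} {i j : Nat} (h : pvBget r j = true) :
    pvBget (r.set i true) j = true := by
  by_cases hij : i = j
  · subst hij; exact pvBget_set_self (pvBget_lt h)
  · rw [pvBget_set_ne _ hij]; exact h

lemma pvCount_set_true {r : List Bool} {i : Nat} (h : i < r.length) (hf : pvBget r i = false) :
    (r.set i true).count true = r.count true + 1 := by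
  induction r generalizing i with
  | nil => simp at h
  | cons x xs ih =>
    cases i with
    | zero => unfold pvBget at hf; simp at hf; simp [hf, List.count_cons]
    | succ n =>
      simp at h
      unfold pvBget at hf; simp at hf
      simp [List.count_cons, ih h hf]
      omega

lemma pvCount_set_true_of_true {r : List Bool} {i : Nat} (h : pvBget r i = true) :
    (r.set i true).count true = r.count true := by
  induction r generalizing i with
  | nil => simp
  | cons x xs ih =>
    cases i with
    | zero => unfold pvBget at h; simp at h; simp [h]
    | succ n =>
      unfold pvBget at h; simp at h
      simp [List.count_cons, ih h]

lemma pvCount_mono {a b : List Bool} (hl : a.length = b.length)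
    (h : ∀ i, pvBget a i = true → pvBget b i = true) :
    a.count true ≤ b.count true := by
  induction a generalizing b with
  | nil => simp
  | cons x xs ih =>
    cases b with
    | nil => simp at hl
    | cons y ys =>
      simp at hl
      have h0 : x = true → y = true := by
        intro hx; have := h 0 (by unfold pvBget; simp [hx]); unfold pvBget at this; simpa using this
      have ht : xs.count true ≤ ys.count true := by
        refine ih hl (fun i hi => ?_)
        have := h (i + 1) (by unfold pvBget at hi ⊢; simpa using hi)
        unfold pvBget at this; simpa using this
      simp [List.count_cons]
      cases x <;> cases y <;> simp_all <;> omega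

lemma pvCount_le_length (r : List Bool) : r.count true ≤ r.length := List.count_le_length

lemma pvBget_forall {r : List Bool} :
    (∀ b ∈ r, b = true) ↔ (∀ i, i < r.length → pvBget r i = true) := by
  constructor
  · intro h i hi
    unfold pvBget
    rw [List.getElem?_eq_getElem hi]
    exact h _ (List.getElem_mem hi)
  · intro h b hb
    obtain ⟨i, hi, rfl⟩ := List.mem_iff_getElem.mp hb
    have := h i hi
    unfold pvBget at this
    rwa [List.getElem?_eq_getElem hi] at this

lemma pvCount_add {r : List Bool} : r.count true + r.count false = r.length := by
  induction r with
  | nil => simp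
  | cons x xs ih => cases x <;> simp [List.count_cons] <;> omega

lemma pvCount_eq_length_iff {r : List Bool} :
    r.count true = r.length ↔ ∀ i, i < r.length → pvBget r i = true := by
  rw [← pvBget_forall]
  constructor
  · intro h b hb
    by_contra hne
    have hb' : b = false := by cases b <;> simp_all
    subst hb'
    have hcf : r.count false ≥ 1 := List.one_le_count_iff.mpr hb
    have hsum := pvCount_add (r := r)
    omega
  · intro h
    have : ∀ b ∈ r, true = b := fun b hb => (h b hb).symm
    exact List.count_eq_length.mpr this

-- membership/length behaviour of one adj[x].append(y)
lemma pvAppendAt_spec (adj : List (List Int)) (x y : Int) (h : pvInR adj.length x) :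
    (pvAppendAt adj x y).length = adj.length ∧
    ∀ i v, v ∈ ((pvAppendAt adj x y)[i]?.getD []) ↔
      v ∈ (adj[i]?.getD []) ∨ (i = pvNrm adj.length x ∧ v = y) := by
  unfold pvAppendAt
  rw [pySetD_pvNrm _ _ _ h, pyGetD_pvNrm _ _ _ h]
  have hlt : pvNrm adj.length x < adj.length := pvNrm_lt h
  refine ⟨by simp, fun i v => ?_⟩
  by_cases hi : i = pvNrm adj.length x
  · subst hi
    rw [List.getElem?_set_self hlt]
    simp
  · rw [List.getElem?_set_ne (fun hc => hi hc.symm)]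
    simp [hi]

-- characterization of the adjacency list A builds (generalized over the start value)
lemma pvBuildAdj_gen (N : Nat) (es : List (Int × Int)) (hval : pvValid N es) :
    ∀ adj0 : List (List Int), adj0.length = N →
    (pvBuildAdj es adj0).length = N ∧
    ∀ i v, v ∈ ((pvBuildAdj es adj0)[i]?.getD []) ↔
      (v ∈ (adj0[i]?.getD []) ∨ ∃ p ∈ es, (pvNrm N p.1 = i ∧ p.2 = v) ∨ (pvNrm N p.2 = i ∧ p.1 = v)) := by
  induction es with
  | nil =>
    intro adj0 h0
    refine ⟨h0, fun i v => ?_⟩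
    simp [pvBuildAdj]
  | cons p es ih =>
    intro adj0 h0
    have hp : pvInR N p.1 ∧ pvInR N p.2 := hval p List.mem_cons_self
    have hval' : pvValid N es := fun q hq => hval q (List.mem_cons_of_mem _ hq)
    have h1 := pvAppendAt_spec adj0 p.1 p.2 (by rw [h0]; exact hp.1)
    have hlen1 : (pvAppendAt adj0 p.1 p.2).length = N := by rw [h1.1, h0]
    have h2 := pvAppendAt_spec (pvAppendAt adj0 p.1 p.2) p.2 p.1 (by rw [hlen1]; exact hp.2)
    have hlen2 : (pvAppendAt (pvAppendAt adj0 p.1 p.2) p.2 p.1).length = N := by rw [h2.1, hlen1]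
    have hstep : pvBuildAdj (p :: es) adj0
        = pvBuildAdj es (pvAppendAt (pvAppendAt adj0 p.1 p.2) p.2 p.1) := by
      simp [pvBuildAdj]
    rw [hstep]
    obtain ⟨ihl, ihm⟩ := ih hval' _ hlen2
    refine ⟨ihl, fun i v => ?_⟩
    rw [ihm i v]
    have e2 := h2.2 i v
    rw [hlen1] at e2
    have e1 := h1.2 i v
    rw [h0] at e1
    rw [e2, e1]
    constructor
    · rintro (((hv | ⟨hi, hv⟩) | ⟨hi, hv⟩) | ⟨q, hq, hcase⟩)
      · exact Or.inl hv
      · exact Or.inr ⟨p, List.mem_cons_self, Or.inl ⟨hi.symm, hv.symm⟩⟩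
      · exact Or.inr ⟨p, List.mem_cons_self, Or.inr ⟨hi.symm, hv.symm⟩⟩
      · exact Or.inr ⟨q, List.mem_cons_of_mem _ hq, hcase⟩
    · rintro (hv | ⟨q, hq, hcase⟩)
      · exact Or.inl (Or.inl (Or.inl hv))
      · rcases List.mem_cons.mp hq with rfl | hq'
        · rcases hcase with ⟨hi, hv⟩ | ⟨hi, hv⟩
          · exact Or.inl (Or.inl (Or.inr ⟨hi.symm, hv.symm⟩))
          · exact Or.inl (Or.inr ⟨hi.symm, hv.symm⟩)
        · exact Or.inr ⟨q, hq', hcase⟩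

lemma pvBuildAdj_spec (N : Nat) (es : List (Int × Int)) (hval : pvValid N es) :
    (pvBuildAdj es (List.replicate N [])).length = N ∧
    ∀ i v, v ∈ ((pvBuildAdj es (List.replicate N []))[i]?.getD []) ↔
      ∃ p ∈ es, (pvNrm N p.1 = i ∧ p.2 = v) ∨ (pvNrm N p.2 = i ∧ p.1 = v) := by
  obtain ⟨hl, hm⟩ := pvBuildAdj_gen N es hval (List.replicate N []) (by simp)
  refine ⟨hl, fun i v => ?_⟩
  rw [hm i v]
  have : (List.replicate N ([] : List Int))[i]?.getD [] = [] := by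
    rcases Nat.lt_or_ge i N with h | h
    · simp [List.getElem?_replicate, h]
    · rw [List.getElem?_eq_none (by simpa using h)]; rfl
  simp [this]

lemma pvBget_set_cases {r : List Bool} {k i : Nat} (h : pvBget (r.set k true) i = true) :
    i = k ∨ pvBget r i = true := by
  by_cases hik : i = k
  · exact Or.inl hik
  · right; rwa [pvBget_set_ne _ (fun hc => hik hc.symm)] at h

lemma pvVisit_eq (N : Nat) (visited : List Bool) (cnt : Int) (stack : List Int) (v : Int)
    (hlen : visited.length = N) (hv : pvInR N v) :
    pvVisit (visited, cnt, stack) v =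
      if pvBget visited (pvNrm N v) then (visited, cnt, stack)
      else (visited.set (pvNrm N v) true, cnt + 1, v :: stack) := by
  subst hlen
  simp only [pvVisit, pvBget]
  rw [pyGetD_pvNrm _ _ _ hv, pySetD_pvNrm _ _ _ hv]
  rfl

-- the inner 'for v in adj[u]' loop of A
lemma pvVisit_fold (N : Nat) (ns : List Int) (hns : ∀ v ∈ ns, pvInR N v) :
    ∀ (visited : List Bool) (cnt : Int) (stack : List Int), visited.length = N →
    ((ns.foldl pvVisit (visited, cnt, stack)).1.length = N ∧
     (cnt = (visited.count true : Int) →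
       (ns.foldl pvVisit (visited, cnt, stack)).2.1 = (((ns.foldl pvVisit (visited, cnt, stack)).1.count true : Nat) : Int)) ∧
     (∀ i, pvBget visited i = true → pvBget (ns.foldl pvVisit (visited, cnt, stack)).1 i = true) ∧
     (∀ v ∈ ns, pvBget (ns.foldl pvVisit (visited, cnt, stack)).1 (pvNrm N v) = true) ∧
     (ns.foldl pvVisit (visited, cnt, stack)).2.2.length + visited.count true
        = stack.length + (ns.foldl pvVisit (visited, cnt, stack)).1.count true ∧
     (∃ pre, (ns.foldl pvVisit (visited, cnt, stack)).2.2 = pre ++ stack ∧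
        (∀ s ∈ pre, s ∈ ns) ∧
        (∀ i, pvBget (ns.foldl pvVisit (visited, cnt, stack)).1 i = true →
          pvBget visited i = true ∨ ∃ s ∈ pre, pvNrm N s = i))) := by
  induction ns with
  | nil =>
    intro visited cnt stack hlen
    refine ⟨hlen, fun h => by simpa using h, fun i h => h, by simp, by simp, [], by simp, by simp,
      fun i h => Or.inl h⟩
  | cons v ns ih =>
    intro visited cnt stack hlen
    have hv : pvInR N v := hns v List.mem_cons_self
    have hns' : ∀ w ∈ ns, pvInR N w := fun w hw => hns w (List.mem_cons_of_mem _ hw)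
    have hnv : pvNrm N v < N := pvNrm_lt hv
    simp only [List.foldl_cons]
    rw [pvVisit_eq N visited cnt stack v hlen hv]
    by_cases hb : pvBget visited (pvNrm N v) = true
    · rw [if_pos hb]
      obtain ⟨l1, l2, l3, l4, l5, pre, hpre, hprem, hwit⟩ := ih hns' visited cnt stack hlen
      exact ⟨l1, l2, l3,
        fun w hw => (List.mem_cons.mp hw).elim (fun h => h ▸ l3 _ hb) (fun h => l4 w h),
        l5, pre, hpre, fun s hs => List.mem_cons_of_mem _ (hprem s hs), hwit⟩
    · rw [if_neg hb]
      have hbf : pvBget visited (pvNrm N v) = false := by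
        cases hx : pvBget visited (pvNrm N v) with
        | true => exact absurd hx hb
        | false => rfl
      have hlen' : (visited.set (pvNrm N v) true).length = N := by simpa using hlen
      have hcnt' : (visited.set (pvNrm N v) true).count true = visited.count true + 1 :=
        pvCount_set_true (by omega) hbf
      obtain ⟨l1, l2, l3, l4, l5, pre, hpre, hprem, hwit⟩ :=
        ih hns' (visited.set (pvNrm N v) true) (cnt + 1) (v :: stack) hlen'
      refine ⟨l1, ?_, ?_, ?_, ?_, pre ++ [v], ?_, ?_, ?_⟩
      · intro hc
        apply l2
        rw [hcnt', hc]
        push_cast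
        ring
      · intro i hi
        exact l3 i (pvBget_set_mono hi)
      · intro w hw
        rcases List.mem_cons.mp hw with rfl | hw'
        · exact l3 _ (pvBget_set_self (by omega))
        · exact l4 w hw'
      · rw [hcnt'] at l5
        simp at l5 ⊢
        omega
      · rw [hpre]; simp
      · intro s hs
        rcases List.mem_append.mp hs with hs' | hs'
        · exact List.mem_cons_of_mem _ (hprem s hs')
        · simp at hs'; subst hs'; exact List.mem_cons_self
      · intro i hi
        rcases hwit i hi with hv' | ⟨s, hs, hni⟩
        · rcases pvBget_set_cases hv' with rfl | hvv
          · exact Or.inr ⟨v, by simp, rfl⟩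
          · exact Or.inl hvv
        · exact Or.inr ⟨s, List.mem_append.mpr (Or.inl hs), hni⟩

-- the DFS main loop of A: its visited set is a minimal step-closed superset of the start set
lemma pvDfs_main (N : Nat) (es : List (Int × Int)) (adj : List (List Int))
    (hval : pvValid N es) (hlen : adj.length = N)
    (hchar : ∀ i v, v ∈ (adj[i]?.getD []) ↔
      ∃ p ∈ es, (pvNrm N p.1 = i ∧ p.2 = v) ∨ (pvNrm N p.2 = i ∧ p.1 = v)) :
    ∀ fuel (stack : List Int) (visited : List Bool) (cnt : Int),
    visited.length = N →
    cnt = (visited.count true : Int) →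
    (∀ s ∈ stack, pvInR N s ∧ pvBget visited (pvNrm N s) = true) →
    (∀ i, pvBget visited i = true →
      (∃ s ∈ stack, pvNrm N s = i) ∨ (∀ j, pvStep N es i j → pvBget visited j = true)) →
    stack.length + N ≤ fuel + visited.count true →
    ((pvDfs adj fuel stack visited cnt).1.length = N ∧
     (pvDfs adj fuel stack visited cnt).2 = (((pvDfs adj fuel stack visited cnt).1.count true : Nat) : Int) ∧
     (∀ i, pvBget visited i = true → pvBget (pvDfs adj fuel stack visited cnt).1 i = true) ∧
     (∀ i j, pvBget (pvDfs adj fuel stack visited cnt).1 i = true → pvStep N es i j →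
        pvBget (pvDfs adj fuel stack visited cnt).1 j = true) ∧
     (∀ T : Nat → Prop, pvClosed N es T → (∀ i, pvBget visited i = true → T i) →
        ∀ i, pvBget (pvDfs adj fuel stack visited cnt).1 i = true → T i)) := by
  intro fuel
  induction fuel with
  | zero =>
    intro stack visited cnt h1 h2 h3 h4 h5
    have hstack : stack = [] := by
      have := pvCount_le_length visited
      have := List.eq_nil_of_length_eq_zero (by omega : stack.length = 0)
      exact this
    subst hstack
    refine ⟨h1, by simpa using h2, fun i h => h, ?_, fun T _ hT i hi => hT i hi⟩
    intro i j hi hstep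
    rcases h4 i hi with ⟨s, hs, _⟩ | hcl
    · simp at hs
    · exact hcl j hstep
  | succ fuel ih =>
    intro stack visited cnt h1 h2 h3 h4 h5
    cases stack with
    | nil =>
      refine ⟨h1, by simpa using h2, fun i h => h, ?_, fun T _ hT i hi => hT i hi⟩
      intro i j hi hstep
      rcases h4 i hi with ⟨s, hs, _⟩ | hcl
      · simp at hs
      · exact hcl j hstep
    | cons u stack' =>
      obtain ⟨hu, hbu⟩ := h3 u List.mem_cons_self
      have h' := pyGetD_pvNrm adj u ([] : List Int) (hlen ▸ hu)
      rw [hlen] at h'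
      have hmem : ∀ v, v ∈ PySem.List.pyGetD adj u [] ↔
          ∃ p ∈ es, (pvNrm N p.1 = pvNrm N u ∧ p.2 = v) ∨ (pvNrm N p.2 = pvNrm N u ∧ p.1 = v) := by
        intro v; rw [h']; exact hchar _ v
      have hns : ∀ v ∈ PySem.List.pyGetD adj u [], pvInR N v := by
        intro v hv
        rcases (hmem v).mp hv with ⟨p, hp, ⟨_, rfl⟩ | ⟨_, rfl⟩⟩
        · exact (hval p hp).2
        · exact (hval p hp).1
      have hstepns : ∀ v ∈ PySem.List.pyGetD adj u [], pvStep N es (pvNrm N u) (pvNrm N v) := by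
        intro v hv
        rcases (hmem v).mp hv with ⟨p, hp, ⟨ha, rfl⟩ | ⟨ha, rfl⟩⟩
        · exact ⟨p, hp, Or.inl ⟨ha, rfl⟩⟩
        · exact ⟨p, hp, Or.inr ⟨ha, rfl⟩⟩
      have hstep_iff : ∀ j, pvStep N es (pvNrm N u) j →
          ∃ v ∈ PySem.List.pyGetD adj u [], pvNrm N v = j := by
        intro j hj
        rcases hj with ⟨p, hp, ⟨ha, hb⟩ | ⟨ha, hb⟩⟩
        · exact ⟨p.2, (hmem p.2).mpr ⟨p, hp, Or.inl ⟨ha, rfl⟩⟩, hb⟩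
        · exact ⟨p.1, (hmem p.1).mpr ⟨p, hp, Or.inr ⟨ha, rfl⟩⟩, hb⟩
      obtain ⟨l1, l2, l3, l4, l5, pre, hpre, hprem, hwit⟩ :=
        pvVisit_fold N (PySem.List.pyGetD adj u []) hns visited cnt stack' h1
      have hred : pvDfs adj (fuel + 1) (u :: stack') visited cnt
          = pvDfs adj fuel ((PySem.List.pyGetD adj u []).foldl pvVisit (visited, cnt, stack')).2.2
              ((PySem.List.pyGetD adj u []).foldl pvVisit (visited, cnt, stack')).1
              ((PySem.List.pyGetD adj u []).foldl pvVisit (visited, cnt, stack')).2.1 := rfl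
      rw [hred]
      have h3' : ∀ s ∈ ((PySem.List.pyGetD adj u []).foldl pvVisit (visited, cnt, stack')).2.2,
          pvInR N s ∧ pvBget ((PySem.List.pyGetD adj u []).foldl pvVisit (visited, cnt, stack')).1 (pvNrm N s) = true := by
        intro s hs
        rw [hpre] at hs
        rcases List.mem_append.mp hs with hs' | hs'
        · exact ⟨hns s (hprem s hs'), l4 s (hprem s hs')⟩
        · obtain ⟨hin, hb⟩ := h3 s (List.mem_cons_of_mem _ hs')
          exact ⟨hin, l3 _ hb⟩
      have h4' : ∀ i, pvBget ((PySem.List.pyGetD adj u []).foldl pvVisit (visited, cnt, stack')).1 i = true →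
          (∃ s ∈ ((PySem.List.pyGetD adj u []).foldl pvVisit (visited, cnt, stack')).2.2, pvNrm N s = i) ∨
          (∀ j, pvStep N es i j → pvBget ((PySem.List.pyGetD adj u []).foldl pvVisit (visited, cnt, stack')).1 j = true) := by
        intro i hi
        rcases hwit i hi with hvis | ⟨s, hs, hni⟩
        · rcases h4 i hvis with ⟨s, hs, hni⟩ | hcl
          · rcases List.mem_cons.mp hs with rfl | hs'
            · right
              intro j hj
              subst hni
              obtain ⟨v, hv, rfl⟩ := hstep_iff j hj
              exact l4 v hv
            · exact Or.inl ⟨s, by rw [hpre]; exact List.mem_append.mpr (Or.inr hs'), hni⟩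
          · exact Or.inr (fun j hj => l3 j (hcl j hj))
        · exact Or.inl ⟨s, by rw [hpre]; exact List.mem_append.mpr (Or.inl hs), hni⟩
      have h5' : ((PySem.List.pyGetD adj u []).foldl pvVisit (visited, cnt, stack')).2.2.length + N ≤
          fuel + ((PySem.List.pyGetD adj u []).foldl pvVisit (visited, cnt, stack')).1.count true := by
        have hsl : (u :: stack').length = stack'.length + 1 := rfl
        omega
      obtain ⟨c1, c2, c3, c4, c5⟩ := ih _ _ _ l1 (l2 h2) h3' h4' h5'
      refine ⟨c1, c2, fun i hi => c3 i (l3 i hi), c4, ?_⟩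
      intro T hcl hT i hi
      refine c5 T hcl ?_ i hi
      intro k hk
      rcases hwit k hk with hv | ⟨s, hs, hni⟩
      · exact hT k hv
      · subst hni
        exact hcl _ _ (hstepns s (hprem s hs)) (hT _ hbu)

lemma pvRelax_eq (N : Nat) (reach : List Bool) (changed : Bool) (p : Int × Int)
    (hlen : reach.length = N) (h1 : pvInR N p.1) (h2 : pvInR N p.2) :
    pvRelax (reach, changed) p =
      if pvBget reach (pvNrm N p.1) ≠ pvBget reach (pvNrm N p.2) then
        ((reach.set (pvNrm N p.1) true).set (pvNrm N p.2) true, true)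
      else (reach, changed) := by
  subst hlen
  simp only [pvRelax, pvBget]
  rw [pyGetD_pvNrm _ _ _ h1, pyGetD_pvNrm _ _ _ h2, pySetD_pvNrm _ _ _ h1,
    pySetD_pvNrm _ _ _ (by simpa using h2), List.length_set]
  split_ifs with h <;> rfl

-- one sweep of B's loop over the edge list
lemma pvRelax_fold (N : Nat) (es : List (Int × Int)) (hval : pvValid N es) :
    ∀ (es' : List (Int × Int)), (∀ p ∈ es', p ∈ es) →
    ∀ (reach : List Bool) (changed : Bool), reach.length = N →
    ((es'.foldl pvRelax (reach, changed)).1.length = N ∧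
     (∀ i, pvBget reach i = true → pvBget (es'.foldl pvRelax (reach, changed)).1 i = true) ∧
     (changed = true → (es'.foldl pvRelax (reach, changed)).2 = true) ∧
     ((es'.foldl pvRelax (reach, changed)).2 = false →
       (es'.foldl pvRelax (reach, changed)).1 = reach ∧
       ∀ p ∈ es', pvBget reach (pvNrm N p.1) = pvBget reach (pvNrm N p.2)) ∧
     ((es'.foldl pvRelax (reach, changed)).2 = true →
       changed = true ∨ reach.count true < (es'.foldl pvRelax (reach, changed)).1.count true) ∧
     (∀ T : Nat → Prop, pvClosed N es T → (∀ i, pvBget reach i = true → T i) →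
        ∀ i, pvBget (es'.foldl pvRelax (reach, changed)).1 i = true → T i)) := by
  intro es'
  induction es' with
  | nil =>
    intro _ reach changed hlen
    exact ⟨hlen, fun i h => h, fun h => h, fun h => ⟨rfl, by simp⟩, fun h => Or.inl (by simpa using h.symm ▸ h), fun T _ hT i hi => hT i hi⟩
  | cons p es' ih =>
    intro hsub reach changed hlen
    have hp : p ∈ es := hsub p List.mem_cons_self
    have hsub' : ∀ q ∈ es', q ∈ es := fun q hq => hsub q (List.mem_cons_of_mem _ hq)
    obtain ⟨hp1, hp2⟩ := hval p hp
    have hn1 : pvNrm N p.1 < N := pvNrm_lt hp1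
    have hn2 : pvNrm N p.2 < N := pvNrm_lt hp2
    simp only [List.foldl_cons]
    rw [pvRelax_eq N reach changed p hlen hp1 hp2]
    by_cases hfire : pvBget reach (pvNrm N p.1) ≠ pvBget reach (pvNrm N p.2)
    · rw [if_pos hfire]
      have hne : pvNrm N p.1 ≠ pvNrm N p.2 := fun hc => hfire (by rw [hc])
      have hlen' : ((reach.set (pvNrm N p.1) true).set (pvNrm N p.2) true).length = N := by
        simpa using hlen
      have hcnt : reach.count true < ((reach.set (pvNrm N p.1) true).set (pvNrm N p.2) true).count true := by
        cases hb1 : pvBget reach (pvNrm N p.1) with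
        | false =>
          have hstrict : (reach.set (pvNrm N p.1) true).count true = reach.count true + 1 :=
            pvCount_set_true (by omega) hb1
          have hmono : (reach.set (pvNrm N p.1) true).count true ≤
              ((reach.set (pvNrm N p.1) true).set (pvNrm N p.2) true).count true :=
            pvCount_mono (by simp) (fun i hi => pvBget_set_mono hi)
          omega
        | true =>
          have hb2 : pvBget reach (pvNrm N p.2) = false := by
            rw [hb1] at hfire
            cases hx : pvBget reach (pvNrm N p.2) with
            | true => exact absurd hx.symm (by simpa using hfire)
            | false => rfl
          have heq1 : (reach.set (pvNrm N p.1) true).count true = reach.count true :=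
            pvCount_set_true_of_true hb1
          have hb2' : pvBget (reach.set (pvNrm N p.1) true) (pvNrm N p.2) = false := by
            rwa [pvBget_set_ne _ hne]
          have hstrict : ((reach.set (pvNrm N p.1) true).set (pvNrm N p.2) true).count true
              = (reach.set (pvNrm N p.1) true).count true + 1 :=
            pvCount_set_true (by simp; omega) hb2'
          omega
      have hsound : ∀ T : Nat → Prop, pvClosed N es T → (∀ i, pvBget reach i = true → T i) →
          ∀ i, pvBget ((reach.set (pvNrm N p.1) true).set (pvNrm N p.2) true) i = true → T i := by
        intro T hcl hT i hi
        have hT12 : T (pvNrm N p.1) ∧ T (pvNrm N p.2) := by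
          cases hb1 : pvBget reach (pvNrm N p.1) with
          | true =>
            have h1 := hT _ hb1
            exact ⟨h1, hcl _ _ ⟨p, hp, Or.inl ⟨rfl, rfl⟩⟩ h1⟩
          | false =>
            have hb2 : pvBget reach (pvNrm N p.2) = true := by
              rw [hb1] at hfire
              cases hx : pvBget reach (pvNrm N p.2) with
              | true => rfl
              | false => rw [hx] at hfire; exact absurd rfl hfire
            have h2 := hT _ hb2
            exact ⟨hcl _ _ ⟨p, hp, Or.inr ⟨rfl, rfl⟩⟩ h2, h2⟩
        rcases pvBget_set_cases hi with rfl | hi'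
        · exact hT12.2
        · rcases pvBget_set_cases hi' with rfl | hi''
          · exact hT12.1
          · exact hT i hi''
      obtain ⟨l1, l2, l3, l4, l5, l6⟩ := ih hsub' _ true hlen'
      refine ⟨l1, ?_, fun _ => l3 rfl, ?_, ?_, ?_⟩
      · intro i hi
        exact l2 i (pvBget_set_mono (pvBget_set_mono hi))
      · intro hfalse
        rw [l3 rfl] at hfalse
        exact absurd hfalse (by simp)
      · intro _
        right
        have := pvCount_mono (a := (reach.set (pvNrm N p.1) true).set (pvNrm N p.2) true)
          (b := (es'.foldl pvRelax ((reach.set (pvNrm N p.1) true).set (pvNrm N p.2) true, true)).1)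
          (by rw [hlen', l1]) l2
        omega
      · intro T hcl hT i hi
        exact l6 T hcl (hsound T hcl hT) i hi
    · rw [if_neg hfire]
      have heq : pvBget reach (pvNrm N p.1) = pvBget reach (pvNrm N p.2) := by
        by_contra hc
        exact hfire hc
      obtain ⟨l1, l2, l3, l4, l5, l6⟩ := ih hsub' reach changed hlen
      refine ⟨l1, l2, l3, ?_, l5, l6⟩
      intro hfalse
      obtain ⟨hr, hall⟩ := l4 hfalse
      refine ⟨hr, fun q hq => ?_⟩
      rcases List.mem_cons.mp hq with rfl | hq'
      · exact heq
      · exact hall q hq'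

-- B's saturation loop: its reach set is a minimal step-closed superset of the start set
lemma pvSaturate_main (N : Nat) (es : List (Int × Int)) (hval : pvValid N es) :
    ∀ fuel (reach : List Bool), reach.length = N → N + 1 ≤ fuel + reach.count true →
    ((pvSaturate es fuel reach).length = N ∧
     (∀ i, pvBget reach i = true → pvBget (pvSaturate es fuel reach) i = true) ∧
     (∀ p ∈ es, pvBget (pvSaturate es fuel reach) (pvNrm N p.1)
        = pvBget (pvSaturate es fuel reach) (pvNrm N p.2)) ∧
     (∀ T : Nat → Prop, pvClosed N es T → (∀ i, pvBget reach i = true → T i) →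
        ∀ i, pvBget (pvSaturate es fuel reach) i = true → T i)) := by
  intro fuel
  induction fuel with
  | zero =>
    intro reach hlen hfuel
    have := pvCount_le_length reach
    omega
  | succ fuel ih =>
    intro reach hlen hfuel
    obtain ⟨l1, l2, l3, l4, l5, l6⟩ := pvRelax_fold N es hval es (fun q hq => hq) reach false hlen
    have hred : pvSaturate es (fuel + 1) reach
        = if (es.foldl pvRelax (reach, false)).2 then pvSaturate es fuel (es.foldl pvRelax (reach, false)).1
          else (es.foldl pvRelax (reach, false)).1 := rfl
    rw [hred]
    by_cases hc : (es.foldl pvRelax (reach, false)).2 = true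
    · rw [if_pos hc]
      have hstrict : reach.count true < (es.foldl pvRelax (reach, false)).1.count true := by
        rcases l5 hc with h | h
        · exact absurd h (by simp)
        · exact h
      obtain ⟨c1, c2, c3, c4⟩ := ih (es.foldl pvRelax (reach, false)).1 l1 (by omega)
      refine ⟨c1, fun i hi => c2 i (l2 i hi), c3, ?_⟩
      intro T hcl hT i hi
      exact c4 T hcl (l6 T hcl hT) i hi
    · rw [if_neg hc]
      have hfalse : (es.foldl pvRelax (reach, false)).2 = false := by
        cases hx : (es.foldl pvRelax (reach, false)).2 with
        | true => exact absurd hx hc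
        | false => rfl
      obtain ⟨hr, hall⟩ := l4 hfalse
      refine ⟨l1, fun i hi => l2 i hi, ?_, fun T hcl hT i hi => l6 T hcl hT i hi⟩
      intro p hp
      rw [hr]
      exact hall p hp

-- per-combination agreement of the two connectivity tests
lemma pvCombo_eq (n : Int) (hn : 1 < n) (es : List (Int × Int)) (hval : pvValid n.toNat es) :
    ((pvDfs (pvBuildAdj es (List.replicate n.toNat [])) n.toNat [0]
        (PySem.List.pySetD (List.replicate n.toNat false) 0 true) 1).2 = n)
    ↔ ((pvSaturate es n.toNat (PySem.List.pySetD (List.replicate n.toNat false) 0 true)).all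
        (fun b => b) = true) := by
  set N := n.toNat with hNdef
  have hNn : (N : Int) = n := Int.toNat_of_nonneg (by omega)
  have hN2 : 2 ≤ N := by omega
  have hl0 : (List.replicate N (false : Bool)).length = N := by simp
  have hin0 : pvInR N (0 : Int) := ⟨by omega, by omega⟩
  have hnrm0 : pvNrm N 0 = 0 := by norm_num [pvNrm]
  have hv0eq : PySem.List.pySetD (List.replicate N false) 0 true
      = (List.replicate N false).set 0 true := by
    rw [pySetD_pvNrm _ _ _ (by rw [hl0]; exact hin0), hl0, hnrm0]
  have hbrep : ∀ i, pvBget (List.replicate N (false : Bool)) i = false := by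
    intro i
    unfold pvBget
    rcases Nat.lt_or_ge i N with h | h
    · simp [List.getElem?_replicate, h]
    · rw [List.getElem?_eq_none (by simpa using h)]; rfl
  have hlenv0 : (PySem.List.pySetD (List.replicate N false) 0 true).length = N := by
    rw [hv0eq]; simpa using hl0
  have hcnt0 : (PySem.List.pySetD (List.replicate N false) 0 true).count true = 1 := by
    rw [hv0eq, pvCount_set_true (by omega) (hbrep 0)]
    simp [List.count_replicate]
  have hbget0 : pvBget (PySem.List.pySetD (List.replicate N false) 0 true) 0 = true := by
    rw [hv0eq]; exact pvBget_set_self (by omega)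
  have hbonly : ∀ i, pvBget (PySem.List.pySetD (List.replicate N false) 0 true) i = true → i = 0 := by
    intro i hi
    rw [hv0eq] at hi
    rcases pvBget_set_cases hi with h | h
    · exact h
    · rw [hbrep i] at h; exact absurd h (by simp)
  obtain ⟨hadjl, hadjm⟩ := pvBuildAdj_spec N es hval
  obtain ⟨c1, c2, c3, c4, c5⟩ := pvDfs_main N es _ hval hadjl hadjm N [0]
    (PySem.List.pySetD (List.replicate N false) 0 true) 1
    hlenv0 (by rw [hcnt0]; simp)
    (by intro s hs; simp at hs; subst hs; exact ⟨hin0, by rw [hnrm0]; exact hbget0⟩)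
    (by intro i hi; exact Or.inl ⟨0, List.mem_cons_self, by rw [hnrm0]; exact (hbonly i hi).symm⟩)
    (by rw [hcnt0]; simp only [List.length_cons, List.length_nil]; omega)
  obtain ⟨s1, s2, s3, s4⟩ := pvSaturate_main N es hval N
    (PySem.List.pySetD (List.replicate N false) 0 true) hlenv0 (by rw [hcnt0])
  set DA := (pvDfs (pvBuildAdj es (List.replicate N [])) N [0]
    (PySem.List.pySetD (List.replicate N false) 0 true) 1).1 with hDA
  set SB := pvSaturate es N (PySem.List.pySetD (List.replicate N false) 0 true) with hSB
  have hclB : pvClosed N es (fun i => pvBget SB i = true) := by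
    intro a b hstep ha
    rcases hstep with ⟨p, hp, ⟨h1, h2⟩ | ⟨h1, h2⟩⟩
    · rw [← h2, ← s3 p hp, h1]; exact ha
    · rw [← h2, s3 p hp, h1]; exact ha
  have hclA : pvClosed N es (fun i => pvBget DA i = true) := by
    intro a b hstep ha
    exact c4 a b ha hstep
  have hAB : ∀ i, pvBget DA i = true ↔ pvBget SB i = true := by
    intro i
    constructor
    · intro hi
      exact c5 (fun k => pvBget SB k = true) hclB
        (fun k hk => by rw [hbonly k hk]; exact s2 0 hbget0) i hi
    · intro hi
      exact s4 (fun k => pvBget DA k = true) hclA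
        (fun k hk => by rw [hbonly k hk]; exact c3 0 hbget0) i hi
  have hlhs : ((pvDfs (pvBuildAdj es (List.replicate N [])) N [0]
      (PySem.List.pySetD (List.replicate N false) 0 true) 1).2 = n) ↔ DA.count true = N := by
    rw [c2]
    constructor
    · intro h
      have : ((DA.count true : Nat) : Int) = (N : Int) := by rw [h, hNn]
      exact_mod_cast this
    · intro h
      rw [h, hNn]
  rw [hlhs, List.all_eq_true]
  have hcount : DA.count true = N ↔ ∀ i, i < N → pvBget DA i = true := by
    rw [← c1]
    exact pvCount_eq_length_iff.trans (by rw [c1])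
  rw [hcount]
  have hmem : (∀ b ∈ SB, b = true) ↔ ∀ i, i < N → pvBget SB i = true := by
    rw [pvBget_forall, s1]
  constructor
  · intro h
    refine hmem.mpr (fun i hi => (hAB i).mp (h i hi))
  · intro h i hi
    exact (hAB i).mpr (hmem.mp (fun b hb => by simpa using h b hb) i hi)

-- ===== VERDICT (by name: the statement is the Claim_ definition above) =====
theorem check_connectivity_batch_spec : Claim_equal_check_connectivity_batch := by
  intro args _hdom hpre
  unfold Spec_check_connectivity_batch
  obtain ⟨n, nodes, ecs⟩ := args
  unfold check_connectivity_batch check_connectivity_batch_alt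
  simp only
  refine PySem.List.foldl_congr_mem ecs _ _ [] ?_
  intro acc es hes
  by_cases hn : n ≤ 1
  · simp only [if_pos hn]
  · have hn' : 1 < n := by omega
    have hv : pvValid n.toNat es := by
      intro p hp
      have h := hpre hn' es hes p hp
      have hcast : ((n.toNat : Int)) = n := Int.toNat_of_nonneg (by omega)
      constructor <;> simp only [pvInR] <;> omega
    simp only [if_neg hn]
    have hiff := pvCombo_eq n hn' es hv
    by_cases hc : (pvDfs (pvBuildAdj es (List.replicate n.toNat [])) n.toNat [0]
        (PySem.List.pySetD (List.replicate n.toNat false) 0 true) 1).2 = n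
    · rw [if_pos hc, if_pos (hiff.mp hc)]
    · rw [if_neg hc, if_neg (fun hb => hc (hiff.mpr hb))]
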